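-- pv_equiv track=rewrite | github.com/evevseev/algorithms-and-data-structures | algorithms/heap/lastHeapIndex.py | lastHeapIndex
-- ===== SOURCE A (Python) =====
-- def lastHeapIndex(arr: list) -> int:
--     if not arr:
--         return 0
--
--     for i in range(1, len(arr)):
--         parent = (i - 1) // 2
--         if arr[i] > arr[parent]:
--             return i - 1
--
--     return len(arr) - 1
-- ===== SOURCE B (Python) =====
-- def lastHeapIndex(arr: list) -> int:
--     if not arr:
--         return 0
--
--     def is_heap_prefix(k):
--         return all(arr[j] <= arr[(j - 1) // 2] for j in range(1, k))
--
--     # P(k) = is_heap_prefix(k) is monotone decreasing in k and P(1) holds,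
--     # so binary-search the largest k in [1, len(arr)] with P(k).
--     lo, hi = 1, len(arr)
--     while lo < hi:
--         mid = (lo + hi + 1) // 2
--         if is_heap_prefix(mid):
--             lo = mid
--         else:
--             hi = mid - 1
--     return lo - 1
-- ===== Notes on version B (the rewrite author's own statement) =====
-- stated objective: alternative
-- what changed: Replaces A's single linear scan for the first child exceeding its parent by a binary search over the monotone predicate 'the prefix of length k is a max-heap' (an O(k) all() prefix check per probe), returning the largest valid prefix length minus one.
import Mathlib
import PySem

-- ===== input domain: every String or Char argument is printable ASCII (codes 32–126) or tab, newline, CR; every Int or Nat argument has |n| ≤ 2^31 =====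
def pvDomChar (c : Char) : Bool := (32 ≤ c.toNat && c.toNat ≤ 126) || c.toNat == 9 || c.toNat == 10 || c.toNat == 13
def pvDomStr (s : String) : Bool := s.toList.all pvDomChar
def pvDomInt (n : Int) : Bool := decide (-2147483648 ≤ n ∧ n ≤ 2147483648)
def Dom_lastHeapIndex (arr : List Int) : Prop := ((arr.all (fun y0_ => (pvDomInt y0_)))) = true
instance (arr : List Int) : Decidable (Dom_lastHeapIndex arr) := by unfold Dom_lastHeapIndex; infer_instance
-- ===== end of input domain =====

-- B replaces A's linear scan by a binary search over the monotone predicate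
-- "the prefix of length k is a max-heap"; a different algorithm ("alternative"), not faster.

-- ===== PORT A =====
-- A's for-loop over i = 1 .. len(arr)-1; indices i and (i-1)//2 are always in range,
-- so getD is exact here ((i-1)//2 for i ≥ 1 equals Nat division (i-1)/2).
def lastHeapIndexLoopA (arr : List Int) (i : Nat) : Int :=
  if _h : i < arr.length then
    if arr.getD ((i - 1) / 2) 0 < arr.getD i 0 then (i : Int) - 1
    else lastHeapIndexLoopA arr (i + 1)
  else (arr.length : Int) - 1
termination_by arr.length - i

def lastHeapIndex (arr : List Int) : Int :=
  if arr = [] then 0 else lastHeapIndexLoopA arr 1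

-- ===== PORT B =====
-- B's helper is_heap_prefix(k): all(...) over range(1, k); all indices in range, getD exact.
def heapPrefOk (arr : List Int) (k : Nat) : Bool :=
  (List.range' 1 (k - 1)).all (fun j => arr.getD j 0 ≤ arr.getD ((j - 1) / 2) 0)

-- B's while-loop binary search; state (lo, hi), mid = (lo+hi+1)//2.
def lastHeapIndexLoopB (arr : List Int) (lo hi : Nat) : Int :=
  if _h : lo < hi then
    let mid := (lo + hi + 1) / 2
    if heapPrefOk arr mid then lastHeapIndexLoopB arr mid hi
    else lastHeapIndexLoopB arr lo (mid - 1)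
  else (lo : Int) - 1
termination_by hi - lo
decreasing_by all_goals omega

def lastHeapIndex_alt (arr : List Int) : Int :=
  if arr = [] then 0 else lastHeapIndexLoopB arr 1 arr.length

-- ===== PRECONDITION & SPEC =====
def Spec_lastHeapIndex (arr : List Int) (out : Int) : Prop := out = lastHeapIndex_alt arr
instance (arr : List Int) (out : Int) : Decidable (Spec_lastHeapIndex arr out) := by unfold Spec_lastHeapIndex; infer_instance

-- ===== CLAIM (what is proved, stated in full; the proofs are below) =====
def Claim_equal_lastHeapIndex : Prop := ∀ (arr : List Int), Dom_lastHeapIndex arr → Spec_lastHeapIndex arr (lastHeapIndex arr)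

-- ===== LEMMAS AND PROOFS =====

-- "prefix of length k is a heap", as a Prop
def HeapPref (arr : List Int) (k : Nat) : Prop :=
  ∀ j, 1 ≤ j → j < k → arr.getD j 0 ≤ arr.getD ((j - 1) / 2) 0

theorem heapPrefOk_iff (arr : List Int) (k : Nat) :
    heapPrefOk arr k = true ↔ HeapPref arr k := by
  unfold heapPrefOk HeapPref
  simp only [List.all_eq_true, List.mem_range', decide_eq_true_eq, one_mul]
  constructor
  · intro h j h1 hk
    exact h j ⟨j - 1, by omega, by omega⟩
  · rintro h j ⟨i, hi, rfl⟩
    exact h (1 + i) (by omega) (by omega)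

theorem heapPref_mono (arr : List Int) {m k : Nat} (h : HeapPref arr k) (hm : m ≤ k) :
    HeapPref arr m := fun j h1 hj => h j h1 (by omega)

-- the largest k ≤ n with a valid heap prefix
def GIdx (arr : List Int) : Nat :=
  Nat.findGreatest (fun k => heapPrefOk arr k = true) arr.length

theorem loopA_char (arr : List Int) (i : Nat) (h1 : 1 ≤ i) (hle : i ≤ arr.length)
    (hp : HeapPref arr i) :
    lastHeapIndexLoopA arr i = (GIdx arr : Int) - 1 := by
  rw [lastHeapIndexLoopA]
  by_cases h : i < arr.length
  · rw [dif_pos h]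
    by_cases hv : arr.getD ((i - 1) / 2) 0 < arr.getD i 0
    · rw [if_pos hv]
      have hgi : GIdx arr = i := by
        have hge : i ≤ GIdx arr := by
          unfold GIdx; exact Nat.le_findGreatest hle ((heapPrefOk_iff arr i).mpr hp)
        have hlt : GIdx arr ≤ i := by
          by_contra hc
          push Not at hc
          have hspec : heapPrefOk arr (GIdx arr) = true := by
            unfold GIdx
            exact Nat.findGreatest_spec (P := fun k => heapPrefOk arr k = true) (m := i) hle ((heapPrefOk_iff arr i).mpr hp)
          have := (heapPrefOk_iff arr (GIdx arr)).mp hspec i h1 hc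
          omega
        omega
      rw [hgi]
    · rw [if_neg hv]
      have hp' : HeapPref arr (i + 1) := by
        intro j hj1 hj
        by_cases hji : j < i
        · exact hp j hj1 hji
        · have : j = i := by omega
          subst this; omega
      exact loopA_char arr (i + 1) (by omega) (by omega) hp'
  · rw [dif_neg h]
    have hin : i = arr.length := by omega
    have : GIdx arr = arr.length := by
      have hge : arr.length ≤ GIdx arr := by
        unfold GIdx
        exact Nat.le_findGreatest (le_refl _) ((heapPrefOk_iff arr _).mpr (hin ▸ hp))
      have hle2 : GIdx arr ≤ arr.length := by
        unfold GIdx; exact Nat.findGreatest_le _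
      omega
    rw [this]
termination_by arr.length - i

theorem loopB_char (arr : List Int) (lo hi : Nat) (h1 : 1 ≤ lo) (hlh : lo ≤ hi)
    (hn : hi ≤ arr.length) (hp : HeapPref arr lo)
    (hub : ∀ k, k ≤ arr.length → HeapPref arr k → k ≤ hi) :
    lastHeapIndexLoopB arr lo hi = (GIdx arr : Int) - 1 := by
  rw [lastHeapIndexLoopB]
  by_cases h : lo < hi
  · rw [dif_pos h]
    simp only []
    by_cases hm : heapPrefOk arr ((lo + hi + 1) / 2) = true
    · rw [if_pos hm]
      exact loopB_char arr ((lo + hi + 1) / 2) hi (by omega) (by omega) hn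
        ((heapPrefOk_iff arr _).mp hm) hub
    · rw [if_neg hm]
      refine loopB_char arr lo ((lo + hi + 1) / 2 - 1) h1 (by omega) (by omega) hp ?_
      intro k hk hpk
      by_contra hc
      push Not at hc
      exact hm ((heapPrefOk_iff arr _).mpr
        (heapPref_mono arr hpk (by omega)))
  · rw [dif_neg h]
    have hlo : lo = hi := by omega
    have hge : lo ≤ GIdx arr := by
      unfold GIdx; exact Nat.le_findGreatest (by omega) ((heapPrefOk_iff arr lo).mpr hp)
    have hgp : heapPrefOk arr (GIdx arr) = true := by
      unfold GIdx
      exact Nat.findGreatest_spec (P := fun k => heapPrefOk arr k = true) (m := lo) (by omega) ((heapPrefOk_iff arr lo).mpr hp)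
    have hgn : GIdx arr ≤ arr.length := by
      unfold GIdx; exact Nat.findGreatest_le _
    have hle2 : GIdx arr ≤ hi := hub _ hgn ((heapPrefOk_iff arr _).mp hgp)
    have : GIdx arr = lo := by omega
    rw [this]
termination_by hi - lo
decreasing_by all_goals omega

-- ===== VERDICT (by name: the statement is the Claim_ definition above) =====
theorem lastHeapIndex_spec : Claim_equal_lastHeapIndex := by
  intro arr _
  unfold Spec_lastHeapIndex lastHeapIndex lastHeapIndex_alt
  by_cases h : arr = []
  · simp [h]
  · rw [if_neg h, if_neg h]
    have hn : 1 ≤ arr.length := by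
      cases arr with
      | nil => exact absurd rfl h
      | cons a t => simp
    have hp1 : HeapPref arr 1 := fun j hj1 hj => by omega
    rw [loopA_char arr 1 (le_refl _) hn hp1,
        loopB_char arr 1 arr.length (le_refl _) hn (le_refl _) hp1
          (fun k hk _ => hk)]
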